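-- pv_equiv track=rewrite | github.com/Shashwat-Akhilesh-Shukla/CognitiveAI-V1 | backend/pdf_loader.py | _find_chunk_boundary
-- ===== SOURCE A (Python) =====
-- def _find_chunk_boundary(text: str, start: int, end: int) -> int:
--     """Find a good boundary to break the chunk (sentence or word)."""
--
--     search_start = max(start, end - 100)
--
--     for i in range(end - 1, search_start - 1, -1):
--         if text[i] in '.!?\n':
--             return i + 1
--
--
--     for i in range(end - 1, search_start - 1, -1):
--         if text[i] in ' \t\n':
--             return i + 1
--
--
--     return end
-- ===== SOURCE B (Python) =====
-- def _find_chunk_boundary(text: str, start: int, end: int) -> int: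
--     """Find a good boundary to break the chunk (sentence or word)."""
--     search_start = max(start, end - 100)
--     last_sentence = None
--     last_word = None
--     for i in range(search_start, end):
--         c = text[i]
--         if c in '.!?\n':
--             last_sentence = i
--         if c in ' \t\n':
--             last_word = i
--     if last_sentence is not None:
--         return last_sentence + 1
--     if last_word is not None:
--         return last_word + 1
--     return end
-- ===== Notes on version B (the rewrite author's own statement) =====
-- stated objective: alternative
-- what changed: Replaces A's two backward early-return scans by one forward pass that keeps overwriting two accumulators (last sentence-ender index, last word-boundary index) and decides after the loop.
-- outside the precondition, e.g. on _find_chunk_boundary('ab.cd', -10, 5): A returns 3, B raises IndexError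
import Mathlib
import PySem

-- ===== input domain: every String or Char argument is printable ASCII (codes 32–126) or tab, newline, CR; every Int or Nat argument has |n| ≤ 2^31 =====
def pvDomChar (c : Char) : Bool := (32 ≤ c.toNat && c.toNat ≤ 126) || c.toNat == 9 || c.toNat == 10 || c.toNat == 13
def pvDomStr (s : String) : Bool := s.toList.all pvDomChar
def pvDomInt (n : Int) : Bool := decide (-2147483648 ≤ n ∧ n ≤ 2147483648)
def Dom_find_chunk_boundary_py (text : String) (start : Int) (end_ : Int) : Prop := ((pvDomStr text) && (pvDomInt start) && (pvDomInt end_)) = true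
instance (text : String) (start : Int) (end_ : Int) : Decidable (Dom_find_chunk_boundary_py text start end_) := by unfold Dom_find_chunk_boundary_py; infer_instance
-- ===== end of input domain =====

-- B replaces A's two backward early-return scans with one forward pass tracking the last
-- sentence-ender and last word-boundary indices; return-value equivalence on Pre_ (alternative decomposition, not faster).


-- ===== PORT A =====
-- text[i] in '.!?\n'  (pyGet? none = IndexError, excluded by Pre_; the port reads it as no match)
def pvIsSent (text : String) (i : Int) : Bool :=
  match PySem.Str.pyGet? text i with
  | some c => ['.', '!', '?', '\n'].contains c
  | none => false

-- text[i] in ' \t\n'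
def pvIsWord (text : String) (i : Int) : Bool :=
  match PySem.Str.pyGet? text i with
  | some c => [' ', '\t', '\n'].contains c
  | none => false

def find_chunk_boundary_py (text : String) (start : Int) (end_ : Int) : Int :=
  let search_start := max start (end_ - 100)
  match (PySem.List.pyRange (end_ - 1) (search_start - 1) (-1)).find? (fun i => pvIsSent text i) with
  | some i => i + 1
  | none =>
    match (PySem.List.pyRange (end_ - 1) (search_start - 1) (-1)).find? (fun i => pvIsWord text i) with
    | some i => i + 1
    | none => end_

-- ===== PORT B =====
def find_chunk_boundary_py_alt (text : String) (start : Int) (end_ : Int) : Int :=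
  let search_start := max start (end_ - 100)
  let st := (PySem.List.pyRange search_start end_ 1).foldl
    (fun (acc : Option Int × Option Int) i =>
      let acc1 := if pvIsSent text i then (some i, acc.2) else acc
      if pvIsWord text i then (acc1.1, some i) else acc1)
    (none, none)
  match st.1 with
  | some s => s + 1
  | none =>
    match st.2 with
    | some w => w + 1
    | none => end_

-- ===== PRECONDITION & SPEC =====
-- Pre_ excludes inputs where an index in [max(start,end-100), end) is outside [-len, len): there the
-- Python of A either raises IndexError or (returning early on a match) returns a value B's full
-- forward pass cannot reach before its own IndexError.
def Pre_find_chunk_boundary_py (text : String) (start : Int) (end_ : Int) : Prop :=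
  end_ ≤ start ∨ (-(PySem.Str.len text) ≤ max start (end_ - 100) ∧ end_ ≤ PySem.Str.len text)
instance (text : String) (start : Int) (end_ : Int) : Decidable (Pre_find_chunk_boundary_py text start end_) := by unfold Pre_find_chunk_boundary_py; infer_instance

def pvWitness_find_chunk_boundary_py : String × Int × Int := ("Hi there. Bye", 0, 13)

def Spec_find_chunk_boundary_py (text : String) (start : Int) (end_ : Int) (out : Int) : Prop := out = find_chunk_boundary_py_alt text start end_
instance (text : String) (start : Int) (end_ : Int) (out : Int) : Decidable (Spec_find_chunk_boundary_py text start end_ out) := by unfold Spec_find_chunk_boundary_py; infer_instance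

-- ===== CLAIM (what is proved, stated in full; the proofs are below) =====
def Claim_equal_find_chunk_boundary_py : Prop := ∀ (text : String) (start : Int) (end_ : Int), Dom_find_chunk_boundary_py text start end_ → Pre_find_chunk_boundary_py text start end_ → Spec_find_chunk_boundary_py text start end_ (find_chunk_boundary_py text start end_)

-- ===== LEMMAS AND PROOFS =====

-- B's loop body updates the two accumulator components independently.
theorem pvStep_eq (text : String) (acc : Option Int × Option Int) (i : Int) :
    (let acc1 := if pvIsSent text i then (some i, acc.2) else acc
     if pvIsWord text i then (acc1.1, some i) else acc1)
    = ((if pvIsSent text i then some i else acc.1),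
       (if pvIsWord text i then some i else acc.2)) := by
  by_cases h1 : pvIsSent text i <;> by_cases h2 : pvIsWord text i <;> simp [h1, h2]

-- Tracking the last match forward is the first match of the reversed list.
theorem pvFoldl_last {α : Type} (p : α → Bool) (l : List α) (acc : Option α) :
    l.foldl (fun a i => if p i then some i else a) acc = (l.reverse.find? p).or acc := by
  induction l generalizing acc with
  | nil => simp
  | cons x l ih =>
      simp only [List.foldl_cons, List.reverse_cons, List.find?_append, ih]
      rcases h : l.reverse.find? p with _ | v
      · by_cases hp : p x <;> simp [List.find?, hp]
      · simp

-- B's pair fold with independently-updated components is the product of two last-match folds.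
theorem pvFoldl_prod (text : String) (l : List Int) (a b : Option Int) :
    l.foldl (fun (acc : Option Int × Option Int) i =>
      let acc1 := if pvIsSent text i then (some i, acc.2) else acc
      if pvIsWord text i then (acc1.1, some i) else acc1) (a, b)
    = (l.foldl (fun a i => if pvIsSent text i then some i else a) a,
       l.foldl (fun b i => if pvIsWord text i then some i else b) b) := by
  rw [show (fun (acc : Option Int × Option Int) i =>
      let acc1 := if pvIsSent text i then (some i, acc.2) else acc
      if pvIsWord text i then (acc1.1, some i) else acc1)
    = (fun (acc : Option Int × Option Int) i =>
      ((if pvIsSent text i then some i else acc.1),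
       (if pvIsWord text i then some i else acc.2))) from funext fun acc => funext fun i => pvStep_eq text acc i]
  induction l generalizing a b with
  | nil => rfl
  | cons x l ih => simp only [List.foldl_cons]; exact ih _ _

-- ===== VERDICT (by name: the statement is the Claim_ definition above) =====
theorem find_chunk_boundary_py_spec : Claim_equal_find_chunk_boundary_py := by
  intro text start end_ _ _
  unfold Spec_find_chunk_boundary_py find_chunk_boundary_py find_chunk_boundary_py_alt
  simp only [pvFoldl_prod, pvFoldl_last, Option.or_none]
  rw [show PySem.List.pyRange (end_ - 1) (max start (end_ - 100) - 1) (-1)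
        = (PySem.List.pyRange (max start (end_ - 100)) end_ 1).reverse by
      rw [PySem.List.pyRange_neg_one_eq_reverse]; ring_nf]
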